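-- pv_equiv track=rewrite | github.com/Nesvetaylov/Neurons | Neuron/lab_4_1.py | train_hopfield
-- ===== SOURCE A (Python) =====
-- def train_hopfield(patterns):
--     N = len(patterns[0])
--     weights = [[0 for _ in range(N)] for _ in range(N)]
--
--     for p in patterns:
--         for i in range(N):
--             for j in range(N):
--                 if i != j:
--                     weights[i][j] += p[i] * p[j]
--     return weights
-- ===== SOURCE B (Python) =====
-- def train_hopfield(patterns):
--     N = len(patterns[0])
--     # Gram matrix is symmetric: compute each unordered pair (i, j), i < j, once
--     # as a dot product over the patterns, then mirror; diagonal stays 0.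
--     upper = [[sum(p[i] * p[j] for p in patterns) for j in range(i + 1, N)]
--              for i in range(N)]
--     return [[0 if i == j else upper[min(i, j)][max(i, j) - min(i, j) - 1]
--              for j in range(N)]
--             for i in range(N)]
-- ===== Notes on version B (the rewrite author's own statement) =====
-- stated objective: alternative
-- what changed: B exploits the symmetry of the weight matrix: it computes each unordered pair (i,j) with i<j once, as a single dot product over the patterns stored in a triangular table, and mirrors it into both (i,j) and (j,i), instead of A's per-pattern accumulation of full outer products into a mutated N x N matrix; this halves the number of multiplications.
import Mathlib
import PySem

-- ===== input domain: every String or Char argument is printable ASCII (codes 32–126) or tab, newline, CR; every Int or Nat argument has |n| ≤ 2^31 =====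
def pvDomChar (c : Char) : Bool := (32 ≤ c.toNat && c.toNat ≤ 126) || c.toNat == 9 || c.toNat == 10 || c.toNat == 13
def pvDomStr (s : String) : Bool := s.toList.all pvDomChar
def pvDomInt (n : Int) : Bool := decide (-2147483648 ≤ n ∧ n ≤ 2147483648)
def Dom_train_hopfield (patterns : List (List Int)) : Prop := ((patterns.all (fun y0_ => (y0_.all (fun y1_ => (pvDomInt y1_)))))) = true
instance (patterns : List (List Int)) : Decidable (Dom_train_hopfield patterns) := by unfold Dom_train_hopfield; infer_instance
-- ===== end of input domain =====

-- B exploits the symmetry of the weight matrix: each unordered pair i<j is computed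
-- once as a dot product over the patterns, stored in a triangular table and mirrored,
-- instead of A's per-pattern accumulation of full outer products (objective:
-- alternative algorithm, half the multiplications; not measured faster in CPython).

-- ===== PORT A =====
-- Literal port of A: N = len(patterns[0]); an N×N zero matrix is mutated in place,
-- adding p[i]*p[j] to entry (i,j) for every pattern p and every i ≠ j.
def train_hopfield (patterns : List (List Int)) : List (List Int) :=
  let N := (PySem.List.pyGetD patterns (0 : Int) []).length
  let weights := (List.range N).map (fun _ => (List.range N).map (fun _ => (0 : Int)))
  patterns.foldl (fun w p =>
    (List.range N).foldl (fun w i =>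
      (List.range N).foldl (fun w j =>
        if i ≠ j then
          w.modify i (fun row => row.modify j
            (fun x => x + PySem.List.pyGetD p (i : Int) 0 * PySem.List.pyGetD p (j : Int) 0))
        else w) w) w) weights

-- ===== PORT B =====
-- The triangular table of Source B: upper[i][k] = sum over patterns of p[i]*p[j] for
-- j = i+1+k; Python's range(i+1, N) is List.range' (i+1) (N-(i+1)).
def pvUpper (patterns : List (List Int)) (N : Nat) : List (List Int) :=
  (List.range N).map (fun (i : Nat) =>
    (List.range' (i+1) (N - (i+1))).map (fun (j : Nat) =>
      patterns.foldl (fun s p =>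
        s + PySem.List.pyGetD p (i : Int) 0 * PySem.List.pyGetD p (j : Int) 0) 0))

-- Literal port of B (Source B): build the upper triangle once, then fill the matrix with
-- 0 on the diagonal and upper[min][max-min-1] mirrored elsewhere (the table indexing
-- is always in range on Pre_, so getD is exact there).
def train_hopfield_alt (patterns : List (List Int)) : List (List Int) :=
  let N := (PySem.List.pyGetD patterns (0 : Int) []).length
  let upper := pvUpper patterns N
  (List.range N).map (fun (i : Nat) => (List.range N).map (fun (j : Nat) =>
    if i = j then 0
    else (upper.getD (min i j) []).getD (max i j - min i j - 1) 0))

-- ===== PRECONDITION & SPEC =====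
-- Pre_ excludes exactly the inputs on which the Python A raises IndexError: empty
-- patterns (patterns[0]), and ragged inputs with N = len(patterns[0]) ≥ 2 and some
-- pattern shorter than N (A then indexes past its end; B raises there too).
def Pre_train_hopfield (patterns : List (List Int)) : Prop :=
  patterns ≠ [] ∧ (2 ≤ (patterns.headD []).length →
    ∀ p ∈ patterns, (patterns.headD []).length ≤ p.length)
instance (patterns : List (List Int)) : Decidable (Pre_train_hopfield patterns) := by
  unfold Pre_train_hopfield; infer_instance
def pvWitness_train_hopfield : List (List Int) := [[1, -1, 1], [-1, 1, 1]]
def Spec_train_hopfield (patterns : List (List Int)) (out : List (List Int)) : Prop := out = train_hopfield_alt patterns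
instance (patterns : List (List Int)) (out : List (List Int)) : Decidable (Spec_train_hopfield patterns out) := by unfold Spec_train_hopfield; infer_instance

-- ===== CLAIM (what is proved, stated in full; the proofs are below) =====
def Claim_equal_train_hopfield : Prop := ∀ (patterns : List (List Int)), Dom_train_hopfield patterns → Pre_train_hopfield patterns → Spec_train_hopfield patterns (train_hopfield patterns)

-- ===== LEMMAS AND PROOFS =====

-- entry (a,b) of a matrix, total via defaults
def pvE (w : List (List Int)) (a b : Nat) : Int := (w.getD a []).getD b 0

-- an N×N shape predicate preserved by A's loop
def pvShape (N : Nat) (w : List (List Int)) : Prop :=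
  w.length = N ∧ ∀ a, a < N → (w.getD a []).length = N

theorem pv_getD_modify {α : Type} (l : List α) (i a : Nat) (f : α → α) (d : α) :
    (l.modify i f).getD a d =
      if i = a ∧ a < l.length then f (l.getD a d) else l.getD a d := by
  by_cases ha : a < l.length
  · have ha' : a < (l.modify i f).length := by simpa [List.length_modify] using ha
    rw [List.getD_eq_getElem _ _ ha', List.getD_eq_getElem _ _ ha, List.getElem_modify]
    by_cases hia : i = a <;> simp [hia, ha]
  · have ha' : ¬ a < (l.modify i f).length := by simpa [List.length_modify] using ha
    rw [List.getD_eq_default _ _ (by omega), List.getD_eq_default _ _ (by omega)]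
    simp [ha]

theorem pvShape_modify {N : Nat} {w : List (List Int)} (hw : pvShape N w)
    (i j : Nat) (f : Int → Int) :
    pvShape N (w.modify i (fun row => row.modify j f)) := by
  obtain ⟨hlen, hrow⟩ := hw
  refine ⟨by simpa [List.length_modify] using hlen, ?_⟩
  intro a ha
  rw [pv_getD_modify]
  split_ifs with h
  · simpa [List.length_modify] using hrow a ha
  · exact hrow a ha

theorem pvE_modify {N : Nat} {w : List (List Int)} (hw : pvShape N w)
    {i j a b : Nat} (ha : a < N) (hb : b < N) (f : Int → Int) :
    pvE (w.modify i (fun row => row.modify j f)) a b =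
      if i = a ∧ j = b then f (pvE w a b) else pvE w a b := by
  obtain ⟨hlen, hrow⟩ := hw
  unfold pvE
  rw [pv_getD_modify]
  by_cases hia : i = a
  · subst hia
    rw [if_pos ⟨rfl, by omega⟩, pv_getD_modify, hrow i ha]
    by_cases hjb : j = b
    · subst hjb; simp [hb]
    · simp [hjb]
  · rw [if_neg (by tauto)]
    simp [hia]

-- the j-loop of A
def pvJ (p : List Int) (i : Nat) (n : Nat) (w : List (List Int)) : List (List Int) :=
  (List.range n).foldl (fun w j =>
    if i ≠ j then
      w.modify i (fun row => row.modify j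
        (fun x => x + PySem.List.pyGetD p (i : Int) 0 * PySem.List.pyGetD p (j : Int) 0))
    else w) w

theorem pvJ_shape {N : Nat} (p : List Int) (i n : Nat) {w : List (List Int)}
    (hw : pvShape N w) : pvShape N (pvJ p i n w) := by
  induction n generalizing w with
  | zero => simpa [pvJ] using hw
  | succ n ih =>
    have : pvJ p i (n+1) w = (fun w j =>
        if i ≠ j then
          w.modify i (fun row => row.modify j
            (fun x => x + PySem.List.pyGetD p (i : Int) 0 * PySem.List.pyGetD p (j : Int) 0))
        else w) (pvJ p i n w) n := by
      simp [pvJ, List.range_succ]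
    rw [this]
    have h1 := ih hw
    by_cases hij : i = n
    · simpa [hij] using h1
    · simpa [hij] using pvShape_modify h1 i n _

theorem pvJ_entry {N : Nat} (p : List Int) (i : Nat) (n : Nat) (hn : n ≤ N)
    {w : List (List Int)} (hw : pvShape N w) {a b : Nat} (ha : a < N) (hb : b < N)
    (_hi : i < N) :
    pvE (pvJ p i n w) a b =
      pvE w a b + (if a = i ∧ b < n ∧ b ≠ i then p.getD i 0 * p.getD b 0 else 0) := by
  induction n generalizing w with
  | zero => simp [pvJ]
  | succ n ih =>
    have hstep : pvJ p i (n+1) w =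
        (if i ≠ n then
          (pvJ p i n w).modify i (fun row => row.modify n
            (fun x => x + p.getD i 0 * p.getD n 0))
        else pvJ p i n w) := by
      simp [pvJ, List.range_succ]
    have hsh := pvJ_shape (N := N) p i n hw
    have hrec := ih (by omega) hw
    by_cases hij : i = n
    · subst hij
      rw [hstep, if_neg (by simp : ¬ (i ≠ i)), hrec]
      congr 1
      by_cases hbi : b = i
      · simp [hbi]
      · by_cases hbn : b < i
        · have h2 : b < i + 1 := by omega
          simp [hbn, h2]
        · have h2 : ¬ b < i + 1 := by omega
          simp [hbn, h2]
    · rw [hstep, if_pos hij, pvE_modify hsh ha hb, hrec]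
      by_cases hai : i = a
      · subst hai
        by_cases hnb : n = b
        · subst hnb
          rw [if_pos ⟨rfl, rfl⟩, if_neg (by omega : ¬(i = i ∧ n < n ∧ n ≠ i)),
              if_pos ⟨rfl, by omega, by omega⟩]
          ring
        · rw [if_neg (by tauto)]
          congr 1
          by_cases hbn : b < n
          · have h2 : b < n + 1 := by omega
            simp [hbn, h2]
          · have h2 : ¬ b < n + 1 := by omega
            simp [hbn, h2]
      · rw [if_neg (by tauto)]
        congr 1
        have h1 : ¬ a = i := fun h => hai h.symm
        simp [h1]

-- the i-loop of A
def pvI (p : List Int) (N : Nat) (n : Nat) (w : List (List Int)) : List (List Int) :=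
  (List.range n).foldl (fun w i => pvJ p i N w) w

theorem pvI_shape {N : Nat} (p : List Int) (n : Nat) {w : List (List Int)}
    (hw : pvShape N w) : pvShape N (pvI p N n w) := by
  induction n generalizing w with
  | zero => simpa [pvI] using hw
  | succ n ih =>
    have : pvI p N (n+1) w = pvJ p n N (pvI p N n w) := by
      simp [pvI, List.range_succ]
    rw [this]
    exact pvJ_shape _ _ _ (ih hw)

theorem pvI_entry {N : Nat} (p : List Int) (n : Nat) (hn : n ≤ N)
    {w : List (List Int)} (hw : pvShape N w) {a b : Nat} (ha : a < N) (hb : b < N) :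
    pvE (pvI p N n w) a b =
      pvE w a b + (if a < n ∧ b ≠ a then p.getD a 0 * p.getD b 0 else 0) := by
  induction n generalizing w with
  | zero => simp [pvI]
  | succ n ih =>
    have hstep : pvI p N (n+1) w = pvJ p n N (pvI p N n w) := by
      simp [pvI, List.range_succ]
    rw [hstep]
    have hsh := pvI_shape (N := N) p n hw
    rw [pvJ_entry p n N le_rfl hsh ha hb (by omega), ih (by omega) hw]
    by_cases han : a = n
    · subst han
      by_cases hba : b ≠ a
      · simp [hba]; omega
      · simp at hba; simp [hba]
    · by_cases hal : a < n
      · have : a < n + 1 := by omega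
        simp [han, hal, this]
      · have h1 : ¬ a < n + 1 := by omega
        simp [han, hal, h1]

-- the pattern loop of A
def pvP (N : Nat) (ps : List (List Int)) (w : List (List Int)) : List (List Int) :=
  ps.foldl (fun w p => pvI p N N w) w

theorem pvP_shape {N : Nat} (ps : List (List Int)) {w : List (List Int)}
    (hw : pvShape N w) : pvShape N (pvP N ps w) := by
  induction ps generalizing w with
  | nil => simpa [pvP] using hw
  | cons p ps ih =>
    simpa [pvP] using ih (pvI_shape (N := N) p N hw)

theorem pvP_entry {N : Nat} (ps : List (List Int)) {w : List (List Int)}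
    (hw : pvShape N w) {a b : Nat} (ha : a < N) (hb : b < N) :
    pvE (pvP N ps w) a b =
      pvE w a b + (if b ≠ a then (ps.map (fun p => p.getD a 0 * p.getD b 0)).sum else 0) := by
  induction ps generalizing w with
  | nil => simp [pvP]
  | cons p ps ih =>
    have : pvP N (p :: ps) w = pvP N ps (pvI p N N w) := by simp [pvP]
    rw [this, ih (pvI_shape (N := N) p N hw),
        pvI_entry p N le_rfl hw ha hb]
    by_cases hba : b ≠ a
    · simp [hba, ha]
      ring
    · simp [hba, ha]

theorem pv_zeros_shape (N : Nat) :
    pvShape N ((List.range N).map (fun _ => (List.range N).map (fun _ => (0 : Int)))) := by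
  refine ⟨by simp, ?_⟩
  intro a ha
  rw [List.getD_eq_getElem _ _ (by simpa using ha)]
  simp

theorem pv_zeros_entry (N a b : Nat) (ha : a < N) :
    pvE ((List.range N).map (fun _ => (List.range N).map (fun _ => (0 : Int)))) a b = 0 := by
  unfold pvE
  have h1 : ((List.range N).map (fun _ => (List.range N).map (fun _ => (0 : Int)))).getD a []
      = (List.range N).map (fun _ => (0 : Int)) := by
    rw [List.getD_eq_getElem _ _ (by simpa using ha)]
    simp
  rw [h1]
  by_cases hb : b < N
  · rw [List.getD_eq_getElem _ _ (by simpa using hb)]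
    simp
  · rw [List.getD_eq_default _ _ (by simp; omega)]

-- A in closed loop form
theorem pvA_eq (patterns : List (List Int)) :
    train_hopfield patterns =
      pvP (patterns.getD 0 []).length patterns
        ((List.range (patterns.getD 0 []).length).map
          (fun _ => (List.range (patterns.getD 0 []).length).map (fun _ => (0 : Int)))) := by
  simp only [train_hopfield, pvP, pvI, pvJ, PySem.List.pyGetD_natCast, PySem.List.pyGetD_zero]

-- B's dot product over patterns as a sum over patterns
theorem pv_foldl_sum (l : List (List Int)) (f : List Int → Int) (c : Int) :
    l.foldl (fun s p => s + f p) c = c + (l.map f).sum := by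
  induction l generalizing c with
  | nil => simp
  | cons x l ih => simp only [List.foldl_cons, List.map_cons, List.sum_cons, ih]; ring

-- the mirrored triangular-table lookup is the per-pair sum
theorem pvB_entry (patterns : List (List Int)) (N : Nat) {a b : Nat}
    (ha : a < N) (hb : b < N) (hab : a ≠ b) :
    ((pvUpper patterns N).getD (min a b) []).getD (max a b - min a b - 1) 0 =
      (patterns.map (fun p => p.getD a 0 * p.getD b 0)).sum := by
  set m := min a b with hm
  set M := max a b with hM
  have hmM : m < M := by omega
  have hMN : M < N := by omega
  have hrow : (pvUpper patterns N).getD m [] =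
      (List.range' (m+1) (N - (m+1))).map (fun (j : Nat) =>
        patterns.foldl (fun s p =>
          s + PySem.List.pyGetD p (m : Int) 0 * PySem.List.pyGetD p (j : Int) 0) 0) := by
    unfold pvUpper
    rw [List.getD_eq_getElem _ _ (by simp; omega)]
    simp
  rw [hrow]
  have hk : M - m - 1 < N - (m+1) := by omega
  rw [List.getD_eq_getElem _ _ (by simpa using hk)]
  rw [List.getElem_map, List.getElem_range']
  have hj : m + 1 + 1 * (M - m - 1) = M := by omega
  rw [hj, pv_foldl_sum]
  simp only [PySem.List.pyGetD_natCast, zero_add]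
  rcases Nat.lt_or_ge a b with h | h
  · have h1 : m = a := by omega
    have h2 : M = b := by omega
    rw [h1, h2]
  · have h1 : m = b := by omega
    have h2 : M = a := by omega
    rw [h1, h2]
    exact congrArg List.sum (List.map_congr_left (fun p _ => mul_comm _ _))

-- ===== VERDICT (by name: the statement is the Claim_ definition above) =====
theorem train_hopfield_spec : Claim_equal_train_hopfield := by
  intro patterns _ _
  unfold Spec_train_hopfield
  have hA := pvA_eq patterns
  set N := (patterns.getD 0 []).length with hN
  have hAsh : pvShape N (train_hopfield patterns) := by
    rw [hA]; exact pvP_shape _ (pv_zeros_shape N)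
  obtain ⟨hlen, hrow⟩ := hAsh
  have hBdef : train_hopfield_alt patterns =
      (List.range N).map (fun (a : Nat) => (List.range N).map (fun (b : Nat) =>
        if a = b then 0
        else ((pvUpper patterns N).getD (min a b) []).getD (max a b - min a b - 1) 0)) := by
    unfold train_hopfield_alt
    simp only [PySem.List.pyGetD_zero]
    rw [← hN]
  apply List.ext_getElem
  · rw [hlen, hBdef]; simp
  · intro a h1 h2
    have ha : a < N := hlen ▸ h1
    have hrA : (train_hopfield patterns)[a].length = N := by
      have := hrow a ha
      rwa [List.getD_eq_getElem _ _ h1] at this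
    apply List.ext_getElem
    · rw [hrA]
      simp only [hBdef, List.getElem_map, List.getElem_range, List.length_map,
        List.length_range]
    · intro b hb1 hb2
      have hbN : b < N := Nat.lt_of_lt_of_eq hb1 hrA
      have hL : (train_hopfield patterns)[a][b] = pvE (train_hopfield patterns) a b := by
        unfold pvE
        rw [List.getD_eq_getElem _ _ h1, List.getD_eq_getElem _ _ hb1]
      rw [hL, hA, pvP_entry patterns (pv_zeros_shape N) ha hbN, pv_zeros_entry N a b ha]
      simp only [hBdef, List.getElem_map, List.getElem_range]
      by_cases hab : a = b
      · simp [hab]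
      · have h1' : b ≠ a := fun h => hab h.symm
        rw [if_neg hab, pvB_entry patterns N ha hbN hab]
        simp [h1']
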